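-- pv_equiv track=rewrite | github.com/lab156/arxivDownload | ner/llm_utils.py | get_words_back
-- ===== SOURCE A (Python) =====
-- def get_words_back(tok_lst, preds=None, init_str = '##', special_tokens=None):
--     '''
--     Joins the tokens into words
--     tok_lst is in the format ['Hi', 'my', 'Na', '##me']
--     word_lst is ['Hi', 'my', 'Name']
--
--     for special_tokens, use special_tokens=tokenizer.special_tokens_map.values()
--
--     words are labeled by the label of the first token.
--     '''
--     if preds == None:
--         preds = ['O' for _ in tok_lst]
--
--     word_lst = []
--     iob_lst = []
--     idx = 0
--     while ( idx < len(tok_lst) ):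
--         aggregate_str = tok_lst[idx]
--         iob_lst.append(preds[idx])
--         idx += 1
--         while (
--             idx < len(tok_lst) and
--             tok_lst[idx].startswith(init_str)
--                ):
--             aggregate_str += tok_lst[idx][2:]
--             idx += 1
--         word_lst.append(aggregate_str)
--     if special_tokens is not None:
--         iob_lst = [iob_lst[k] for k,w in enumerate(word_lst) if w
--                    not in special_tokens]
--         word_lst = [w for w in word_lst if w
--                    not in special_tokens]
--     return word_lst, iob_lst
-- ===== SOURCE B (Python) =====
-- def get_words_back(tok_lst, preds=None, init_str='##', special_tokens=None):
--     if preds is None: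
--         preds = ['O' for _ in tok_lst]
--     word_lst = []
--     iob_lst = []
--     for i, tok in enumerate(tok_lst):
--         if word_lst and tok.startswith(init_str):
--             word_lst[-1] += tok[2:]
--         else:
--             word_lst.append(tok)
--             iob_lst.append(preds[i])
--     if special_tokens is not None:
--         kept = [(w, t) for w, t in zip(word_lst, iob_lst) if w not in special_tokens]
--         word_lst = [w for w, _ in kept]
--         iob_lst = [t for _, t in kept]
--     return word_lst, iob_lst
-- ===== Notes on version B (the rewrite author's own statement) =====
-- stated objective: simpler
-- what changed: Replaces A's nested while/while index loops with a single flat enumerate pass that extends the current last word on continuation tokens, and replaces the two index-based filtering comprehensions with one zip-filter-unzip step.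
import Mathlib
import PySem

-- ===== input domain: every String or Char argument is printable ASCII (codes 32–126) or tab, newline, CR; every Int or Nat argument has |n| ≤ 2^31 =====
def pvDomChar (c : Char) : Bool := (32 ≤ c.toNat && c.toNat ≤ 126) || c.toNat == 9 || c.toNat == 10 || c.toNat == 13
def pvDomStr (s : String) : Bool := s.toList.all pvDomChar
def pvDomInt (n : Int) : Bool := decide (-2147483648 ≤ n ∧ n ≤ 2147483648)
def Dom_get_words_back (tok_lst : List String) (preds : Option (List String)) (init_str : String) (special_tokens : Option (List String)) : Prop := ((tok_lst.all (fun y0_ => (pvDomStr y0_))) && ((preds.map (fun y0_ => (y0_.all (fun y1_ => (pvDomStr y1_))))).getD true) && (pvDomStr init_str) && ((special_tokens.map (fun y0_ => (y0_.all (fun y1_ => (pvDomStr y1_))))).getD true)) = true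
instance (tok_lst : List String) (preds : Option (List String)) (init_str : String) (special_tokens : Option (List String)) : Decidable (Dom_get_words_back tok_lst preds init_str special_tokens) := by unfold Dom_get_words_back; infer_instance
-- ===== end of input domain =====

-- B replaces A's nested while/while index loops by one flat pass (merge-into-last-word)
-- and A's two index-based filtering comprehensions by a single zip-filter-unzip step.

-- ===== PORT A =====
-- inner 'while idx < len(tok_lst) and tok_lst[idx].startswith(init_str)' loop of A
def gwbInner (tok_lst : List String) (init_str : String) (idx : Nat) (agg : String) : Nat × String :=
  if h : idx < tok_lst.length then
    if PySem.Str.startswith tok_lst[idx] init_str then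
      gwbInner tok_lst init_str (idx + 1) (agg ++ PySem.Str.slice tok_lst[idx] (some 2) none)
    else (idx, agg)
  else (idx, agg)
termination_by tok_lst.length - idx

-- the inner loop never moves idx backwards (needed for the outer loop's termination)
theorem gwbInner_fst_ge (tok_lst : List String) (init_str : String) (idx : Nat) (agg : String) :
    idx ≤ (gwbInner tok_lst init_str idx agg).1 := by
  fun_induction gwbInner tok_lst init_str idx agg with
  | case1 idx agg h hs ih => exact le_trans (Nat.le_succ idx) ih
  | case2 => simp
  | case3 => simp

-- outer 'while idx < len(tok_lst)' loop of A
def gwbOuter (tok_lst ps : List String) (init_str : String) (idx : Nat)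
    (word_lst iob_lst : List String) : List String × List String :=
  if h : idx < tok_lst.length then
    let aggregate_str := tok_lst[idx]
    let iob_lst' := iob_lst ++ [ps.getD idx ""]   -- preds[idx]; Pre_ keeps the index in range
    let r := gwbInner tok_lst init_str (idx + 1) aggregate_str
    gwbOuter tok_lst ps init_str r.1 (word_lst ++ [r.2]) iob_lst'
  else (word_lst, iob_lst)
termination_by tok_lst.length - idx
decreasing_by
  have := gwbInner_fst_ge tok_lst init_str (idx + 1) tok_lst[idx]
  omega

def get_words_back (tok_lst : List String) (preds : Option (List String)) (init_str : String) (special_tokens : Option (List String)) : List String × List String :=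
  let ps := match preds with
    | none => tok_lst.map (fun _ => "O")
    | some ps => ps
  let r := gwbOuter tok_lst ps init_str 0 [] []
  match special_tokens with
  | none => r
  | some sts =>
      -- iob_lst = [iob_lst[k] for k,w in enumerate(word_lst) if w not in special_tokens]
      (r.1.filter (fun w => !(sts.contains w)),
       ((PySem.List.enumerate r.1).filter (fun p => !(sts.contains p.2))).map
         (fun p => PySem.List.pyGetD r.2 p.1 ""))

-- ===== PORT B =====
-- one step of B's flat loop; state is (word_lst reversed, iob_lst reversed)
def gwbStep (ps : List String) (init_str : String)
    (st : List String × List String) (p : Int × String) : List String × List String :=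
  match st with
  | (w :: ws, ri) =>
      if PySem.Str.startswith p.2 init_str then
        ((w ++ PySem.Str.slice p.2 (some 2) none) :: ws, ri)   -- word_lst[-1] += tok[2:]
      else (p.2 :: w :: ws, PySem.List.pyGetD ps p.1 "" :: ri)
  | ([], ri) => ([p.2], PySem.List.pyGetD ps p.1 "" :: ri)

def get_words_back_alt (tok_lst : List String) (preds : Option (List String)) (init_str : String) (special_tokens : Option (List String)) : List String × List String :=
  let ps := match preds with
    | none => tok_lst.map (fun _ => "O")
    | some ps => ps
  let r := (PySem.List.enumerate tok_lst).foldl (gwbStep ps init_str) ([], [])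
  let word_lst := r.1.reverse
  let iob_lst := r.2.reverse
  match special_tokens with
  | none => (word_lst, iob_lst)
  | some sts =>
      let kept := (word_lst.zip iob_lst).filter (fun p => !(sts.contains p.1))
      (kept.map Prod.fst, kept.map Prod.snd)

-- ===== PRECONDITION & SPEC =====
-- Pre_ excludes exactly the inputs where Python A raises IndexError: an explicit preds list
-- too short to cover some word-start index (i = 0 or a token not starting with init_str).
def Pre_get_words_back (tok_lst : List String) (preds : Option (List String)) (init_str : String) (special_tokens : Option (List String)) : Prop :=
  ∀ (i : Nat) (h : i < tok_lst.length),
    (i = 0 ∨ PySem.Str.startswith tok_lst[i] init_str = false) →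
    i < (preds.getD (tok_lst.map (fun _ => "O"))).length
instance (tok_lst : List String) (preds : Option (List String)) (init_str : String) (special_tokens : Option (List String)) : Decidable (Pre_get_words_back tok_lst preds init_str special_tokens) := by unfold Pre_get_words_back; infer_instance

def pvWitness_get_words_back : List String × Option (List String) × String × Option (List String) :=
  (["[CLS]", "Hi", "Na", "##me"], some ["O", "O", "B", "I"], "##", some ["[CLS]"])

def Spec_get_words_back (tok_lst : List String) (preds : Option (List String)) (init_str : String) (special_tokens : Option (List String)) (out : List String × List String) : Prop := out = get_words_back_alt tok_lst preds init_str special_tokens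
instance (tok_lst : List String) (preds : Option (List String)) (init_str : String) (special_tokens : Option (List String)) (out : List String × List String) : Decidable (Spec_get_words_back tok_lst preds init_str special_tokens out) := by unfold Spec_get_words_back; infer_instance

-- ===== CLAIM (what is proved, stated in full; the proofs are below) =====
def Claim_equal_get_words_back : Prop := ∀ (tok_lst : List String) (preds : Option (List String)) (init_str : String) (special_tokens : Option (List String)), Dom_get_words_back tok_lst preds init_str special_tokens → Pre_get_words_back tok_lst preds init_str special_tokens → Spec_get_words_back tok_lst preds init_str special_tokens (get_words_back tok_lst preds init_str special_tokens)

-- ===== LEMMAS AND PROOFS =====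

-- where the inner loop stops, the token (if any) does not start with init_str
theorem gwbInner_stop (tok_lst : List String) (init_str : String) (idx : Nat) (agg : String)
    (h : (gwbInner tok_lst init_str idx agg).1 < tok_lst.length) :
    PySem.Str.startswith (tok_lst[(gwbInner tok_lst init_str idx agg).1]'h) init_str = false := by
  revert h
  fun_induction gwbInner tok_lst init_str idx agg with
  | case1 idx agg h1 hs ih => exact ih
  | case2 idx agg h1 hs => intro _; simpa using hs
  | case3 idx agg h1 => intro h; exact absurd h h1

-- B's fold walks through a run of continuation tokens exactly as A's inner loop does
theorem fold_inner (tok_lst ps : List String) (init_str : String) :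
    ∀ (n j : Nat), tok_lst.length - j ≤ n → ∀ (agg : String) (ws ri : List String),
      (PySem.List.enumerate (tok_lst.drop j) (j : Int)).foldl (gwbStep ps init_str) (agg :: ws, ri)
      = (PySem.List.enumerate (tok_lst.drop (gwbInner tok_lst init_str j agg).1)
           (((gwbInner tok_lst init_str j agg).1 : Nat) : Int)).foldl (gwbStep ps init_str)
          ((gwbInner tok_lst init_str j agg).2 :: ws, ri) := by
  intro n
  induction n with
  | zero =>
      intro j hj agg ws ri
      have h1 : ¬ j < tok_lst.length := by omega
      rw [gwbInner, dif_neg h1]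
  | succ n ih =>
      intro j hj agg ws ri
      by_cases h1 : j < tok_lst.length
      · by_cases h2 : PySem.Str.startswith tok_lst[j] init_str = true
        · have hd : tok_lst.drop j = tok_lst[j] :: tok_lst.drop (j + 1) :=
            List.drop_eq_getElem_cons h1
          have hc : ((j : Int) + 1) = ((j + 1 : Nat) : Int) := by push_cast; ring
          rw [gwbInner, dif_pos h1, if_pos h2, hd, PySem.List.enumerate_cons, List.foldl_cons,
            hc]
          have hstep : gwbStep ps init_str (agg :: ws, ri) ((j : Int), tok_lst[j])
              = ((agg ++ PySem.Str.slice tok_lst[j] (some 2) none) :: ws, ri) := by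
            have h2' : PySem.Chars.startswith tok_lst[j].toList init_str.toList = true := by
              simpa using h2
            simp [gwbStep, h2']
          rw [hstep]
          exact ih (j + 1) (by omega) _ ws ri
        · rw [gwbInner, dif_pos h1, if_neg h2]
      · rw [gwbInner, dif_neg h1]

-- main loop correspondence: A's outer loop = B's fold over the remaining enumerated suffix
theorem outer_fold (tok_lst ps : List String) (init_str : String) :
    ∀ (n idx : Nat), tok_lst.length - idx ≤ n → ∀ (rw ri : List String),
      (rw = [] ∨ tok_lst.length ≤ idx ∨ PySem.Str.startswith (tok_lst.getD idx "") init_str = false) →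
      gwbOuter tok_lst ps init_str idx rw.reverse ri.reverse
      = (((PySem.List.enumerate (tok_lst.drop idx) (idx : Int)).foldl (gwbStep ps init_str) (rw, ri)).1.reverse,
         ((PySem.List.enumerate (tok_lst.drop idx) (idx : Int)).foldl (gwbStep ps init_str) (rw, ri)).2.reverse) := by
  intro n
  induction n with
  | zero =>
      intro idx hj rw ri _
      have h1 : ¬ idx < tok_lst.length := by omega
      rw [gwbOuter, dif_neg h1, List.drop_eq_nil_of_le (by omega)]
      simp [PySem.List.enumerate]
  | succ n ih =>
      intro idx hj rw ri hc
      by_cases h1 : idx < tok_lst.length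
      · have hd : tok_lst.drop idx = tok_lst[idx] :: tok_lst.drop (idx + 1) :=
          List.drop_eq_getElem_cons h1
        have hc' : ((idx : Int) + 1) = ((idx + 1 : Nat) : Int) := by push_cast; ring
        rw [gwbOuter, dif_pos h1, hd, PySem.List.enumerate_cons, List.foldl_cons, hc']
        have hpd : PySem.List.pyGetD ps ((idx : Nat) : Int) "" = ps.getD idx "" := by
          simp [PySem.List.pyGetD_natCast]
        have hstep : gwbStep ps init_str (rw, ri) ((idx : Int), tok_lst[idx])
            = (tok_lst[idx] :: rw, ps.getD idx "" :: ri) := by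
          rcases hc with hrw | hle | hsw
          · subst hrw; simp [gwbStep, hpd]
          · omega
          · cases rw with
            | nil => simp [gwbStep, hpd]
            | cons w ws =>
                have hsw' : PySem.Chars.startswith tok_lst[idx].toList init_str.toList = false := by
                  have : tok_lst.getD idx "" = tok_lst[idx] := List.getD_eq_getElem _ _ h1
                  rw [this] at hsw; simpa using hsw
                simp [gwbStep, hsw', hpd]
        rw [hstep, fold_inner tok_lst ps init_str (tok_lst.length - (idx + 1)) (idx + 1)
          (by omega) tok_lst[idx] rw (ps.getD idx "" :: ri)]
        set r := gwbInner tok_lst init_str (idx + 1) tok_lst[idx] with hr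
        have hge : idx + 1 ≤ r.1 := gwbInner_fst_ge tok_lst init_str (idx + 1) tok_lst[idx]
        have hcnext : (r.2 :: rw = [] ∨ tok_lst.length ≤ r.1 ∨
            PySem.Str.startswith (tok_lst.getD r.1 "") init_str = false) := by
          by_cases h2 : r.1 < tok_lst.length
          · right; right
            have := gwbInner_stop tok_lst init_str (idx + 1) tok_lst[idx] (by rw [← hr]; exact h2)
            rw [List.getD_eq_getElem _ _ h2]
            simpa [← hr] using this
          · right; left; omega
        have := ih r.1 (by omega) (r.2 :: rw) (ps.getD idx "" :: ri) hcnext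
        simpa using this
      · have h0 : ¬ idx < tok_lst.length := h1
        rw [gwbOuter, dif_neg h0, List.drop_eq_nil_of_le (by omega)]
        simp [PySem.List.enumerate]

-- the fold keeps as many labels as words
theorem fold_len (ps : List String) (init_str : String) :
    ∀ (l : List (Int × String)) (st : List String × List String), st.1.length = st.2.length →
      (l.foldl (gwbStep ps init_str) st).1.length = (l.foldl (gwbStep ps init_str) st).2.length := by
  intro l
  induction l with
  | nil => intro st h; exact h
  | cons p l ih =>
      intro st h
      refine ih _ ?_
      obtain ⟨ws, ri⟩ := st
      cases ws with
      | nil => simp [gwbStep] at h ⊢; cases ri <;> simp_all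
      | cons w ws => simp [gwbStep] at h ⊢; split <;> simp_all

-- A's enumerate/index comprehension = B's zip-filter, words side and labels side
theorem filt_pair (sts : List String) :
    ∀ (ws : List String) (s : Nat) (iobs : List String), s + ws.length ≤ iobs.length →
      ws.filter (fun w => !(sts.contains w))
        = ((ws.zip (iobs.drop s)).filter (fun p => !(sts.contains p.1))).map Prod.fst
      ∧ ((PySem.List.enumerate ws (s : Int)).filter (fun p => !(sts.contains p.2))).map
          (fun p => PySem.List.pyGetD iobs p.1 "")
        = ((ws.zip (iobs.drop s)).filter (fun p => !(sts.contains p.1))).map Prod.snd := by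
  intro ws
  induction ws with
  | nil => intro s iobs _; simp [PySem.List.enumerate]
  | cons w ws ih =>
      intro s iobs h
      have hs : s < iobs.length := by simp at h; omega
      have hd : iobs.drop s = iobs[s] :: iobs.drop (s + 1) := List.drop_eq_getElem_cons hs
      have hc : ((s : Int) + 1) = ((s + 1 : Nat) : Int) := by push_cast; ring
      have hpd : PySem.List.pyGetD iobs ((s : Nat) : Int) "" = iobs[s] := by
        rw [PySem.List.pyGetD_natCast, List.getD_eq_getElem _ _ hs]
      obtain ⟨ih1, ih2⟩ := ih (s + 1) iobs (by simp at h ⊢; omega)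
      rw [hd, PySem.List.enumerate_cons, hc]
      rw [show iobs[s] :: iobs.drop (s + 1) = [iobs[s]] ++ iobs.drop (s + 1) from rfl]
      generalize iobs.drop (s + 1) = tl at ih1 ih2 ⊢
      by_cases hw : w ∈ sts
      · exact ⟨by simpa [List.filter_cons, hw] using ih1,
               by simpa [List.filter_cons, hw] using ih2⟩
      · exact ⟨by simpa [List.filter_cons, hw] using ih1,
               by simpa [List.filter_cons, hw, hpd] using ih2⟩

-- ===== VERDICT (by name: the statement is the Claim_ definition above) =====
-- the two ports agree for every ps/special_tokens (the preds-defaulting step is shared)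
theorem ports_agree (tok_lst ps : List String) (init_str : String) (st : Option (List String)) :
    (let r := gwbOuter tok_lst ps init_str 0 [] []
     match st with
     | none => r
     | some sts =>
         (r.1.filter (fun w => !(sts.contains w)),
          ((PySem.List.enumerate r.1).filter (fun (p : Int × String) => !(sts.contains p.2))).map
            (fun (p : Int × String) => PySem.List.pyGetD r.2 p.1 "")))
    = (let r := (PySem.List.enumerate tok_lst).foldl (gwbStep ps init_str) ([], [])
       let word_lst := r.1.reverse
       let iob_lst := r.2.reverse
       match st with
       | none => (word_lst, iob_lst)
       | some sts =>
           let kept := (word_lst.zip iob_lst).filter (fun (p : String × String) => !(sts.contains p.1))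
           (kept.map Prod.fst, kept.map Prod.snd)) := by
  have key := outer_fold tok_lst ps init_str tok_lst.length 0 (by omega) [] [] (Or.inl rfl)
  simp only [List.drop_zero, List.reverse_nil, Nat.cast_zero] at key
  have hlen := fold_len ps init_str (PySem.List.enumerate tok_lst) ([], []) rfl
  set F := (PySem.List.enumerate tok_lst).foldl (gwbStep ps init_str) ([], []) with hF
  cases st with
  | none => simpa using key
  | some sts =>
      have hle : 0 + F.1.reverse.length ≤ F.2.reverse.length := by simp [hlen]
      obtain ⟨h1, h2⟩ := filt_pair sts F.1.reverse 0 F.2.reverse hle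
      simp only [List.drop_zero] at h1 h2
      simp only [key, Nat.cast_zero] at *
      exact Prod.ext (by simpa using h1) (by simpa using h2)

theorem get_words_back_spec : Claim_equal_get_words_back := by
  intro tok_lst preds init_str st _ _
  unfold Spec_get_words_back get_words_back get_words_back_alt
  exact ports_agree tok_lst _ init_str st
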